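-- pv_equiv track=rewrite | github.com/Munzeltje/thesis-recommender-systems | evaluation.py | lists_filter_types
-- ===== SOURCE A (Python) =====
-- def lists_filter_types(sessions):
--     sessions_old = [
--         session
--         for session in sessions
--         if session["filter_type"] == "old"
--         or session["filter_type"] == "band_type"
--         or session["filter_type"] == "band_proband"
--     ]
--     sessions_knn = [
--         session
--         for session in sessions
--         if session["filter_type"] == "band_recommender"
--         or "knn" in session["filter_type"]
--     ]
--     sessions_gru = [session for session in sessions if session["filter_type"] == "gru"]
--     return sessions_old, sessions_knn, sessions_gru
-- ===== SOURCE B (Python) =====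
-- def lists_filter_types(sessions):
--     sessions_old, sessions_knn, sessions_gru = [], [], []
--     for session in sessions:
--         filter_type = session["filter_type"]
--         if filter_type in ("old", "band_type", "band_proband"):
--             sessions_old.append(session)
--         elif filter_type == "band_recommender" or "knn" in filter_type:
--             sessions_knn.append(session)
--         elif filter_type == "gru":
--             sessions_gru.append(session)
--     return sessions_old, sessions_knn, sessions_gru
-- ===== Notes on version B (the rewrite author's own statement) =====
-- stated objective: faster
-- what changed: One single dispatching pass with an if/elif chain and three accumulators replaces A's three independent comprehension scans (the three predicates are mutually exclusive, so the chain partitions identically); each session's filter_type is read once instead of up to four times.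
import Mathlib
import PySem

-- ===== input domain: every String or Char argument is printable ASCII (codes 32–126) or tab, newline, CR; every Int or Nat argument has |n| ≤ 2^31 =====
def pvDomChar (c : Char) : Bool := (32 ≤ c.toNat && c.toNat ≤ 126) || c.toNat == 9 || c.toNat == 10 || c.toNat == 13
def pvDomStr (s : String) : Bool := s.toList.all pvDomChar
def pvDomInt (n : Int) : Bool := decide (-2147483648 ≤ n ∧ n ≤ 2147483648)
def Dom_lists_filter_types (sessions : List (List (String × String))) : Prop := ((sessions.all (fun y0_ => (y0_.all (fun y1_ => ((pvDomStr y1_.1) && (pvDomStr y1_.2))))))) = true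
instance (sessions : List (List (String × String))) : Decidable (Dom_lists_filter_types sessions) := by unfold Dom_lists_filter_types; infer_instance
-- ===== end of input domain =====

-- B replaces A's three separate comprehension scans by one dispatching pass (if/elif chain,
-- three accumulators), reading each session's filter_type once; return value equivalence proved.


-- ===== PORT A =====
-- session["filter_type"]: first-match assoc lookup; Python raises KeyError when the key is
-- missing — Pre_ excludes that, so the .getD "" default is never reached on admitted inputs.
def ftOf (session : List (String × String)) : String :=
  (List.lookup "filter_type" session).getD ""

def lists_filter_types (sessions : List (List (String × String))) : (List (List (String × String))) × (List (List (String × String))) × (List (List (String × String))) :=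
  let sessions_old := sessions.filter (fun s =>
    ftOf s == "old" || ftOf s == "band_type" || ftOf s == "band_proband")
  let sessions_knn := sessions.filter (fun s =>
    ftOf s == "band_recommender" || PySem.Str.isIn "knn" (ftOf s))
  let sessions_gru := sessions.filter (fun s => ftOf s == "gru")
  (sessions_old, sessions_knn, sessions_gru)

-- ===== PORT B =====
def altLoop (sessions : List (List (String × String)))
    (acc : (List (List (String × String))) × (List (List (String × String))) × (List (List (String × String)))) :
    (List (List (String × String))) × (List (List (String × String))) × (List (List (String × String))) :=
  match sessions with
  | [] => acc
  | s :: rest =>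
    let ft := ftOf s
    let (o, k, g) := acc
    if ft == "old" || ft == "band_type" || ft == "band_proband" then
      altLoop rest (o ++ [s], k, g)
    else if ft == "band_recommender" || PySem.Str.isIn "knn" ft then
      altLoop rest (o, k ++ [s], g)
    else if ft == "gru" then
      altLoop rest (o, k, g ++ [s])
    else
      altLoop rest (o, k, g)

def lists_filter_types_alt (sessions : List (List (String × String))) : (List (List (String × String))) × (List (List (String × String))) × (List (List (String × String))) :=
  altLoop sessions ([], [], [])

-- ===== PRECONDITION & SPEC =====
-- Python raises KeyError when a session lacks the "filter_type" key; Pre_ excludes exactly those.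
def Pre_lists_filter_types (sessions : List (List (String × String))) : Prop :=
  ∀ s ∈ sessions, (List.lookup "filter_type" s).isSome = true
instance (sessions : List (List (String × String))) : Decidable (Pre_lists_filter_types sessions) := by unfold Pre_lists_filter_types; infer_instance
def pvWitness_lists_filter_types : (List (List (String × String))) :=
  [[("filter_type", "old")], [("filter_type", "myknn"), ("x", "y")], [("filter_type", "gru")], [("filter_type", "none")]]

def Spec_lists_filter_types (sessions : List (List (String × String))) (out : (List (List (String × String))) × (List (List (String × String))) × (List (List (String × String)))) : Prop := out = lists_filter_types_alt sessions
instance (sessions : List (List (String × String))) (out : (List (List (String × String))) × (List (List (String × String))) × (List (List (String × String)))) : Decidable (Spec_lists_filter_types sessions out) := by unfold Spec_lists_filter_types; infer_instance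

-- ===== CLAIM (what is proved, stated in full; the proofs are below) =====
def Claim_equal_lists_filter_types : Prop := ∀ (sessions : List (List (String × String))), Dom_lists_filter_types sessions → Pre_lists_filter_types sessions → Spec_lists_filter_types sessions (lists_filter_types sessions)

-- ===== LEMMAS AND PROOFS =====

-- the old-predicate excludes the knn- and gru-predicates (componentwise)
theorem old_excl (ft : String) (h : (ft == "old" || ft == "band_type" || ft == "band_proband") = true) :
    (ft == "band_recommender") = false ∧ PySem.Chars.isIn ['k', 'n', 'n'] ft.toList = false ∧ (ft == "gru") = false := by
  simp only [Bool.or_eq_true, beq_iff_eq] at h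
  rcases h with (h | h) | h <;> subst h <;> exact ⟨by decide, by decide, by decide⟩

-- the gru-predicate excludes the knn-predicate (componentwise)
theorem gru_excl (ft : String) (h : (ft == "gru") = true) :
    (ft == "band_recommender") = false ∧ PySem.Chars.isIn ['k', 'n', 'n'] ft.toList = false := by
  simp only [beq_iff_eq] at h; subst h; exact ⟨by decide, by decide⟩

theorem altLoop_spec (sessions : List (List (String × String)))
    (o k g : List (List (String × String))) :
    altLoop sessions (o, k, g) =
      (o ++ (lists_filter_types sessions).1,
       k ++ (lists_filter_types sessions).2.1,
       g ++ (lists_filter_types sessions).2.2) := by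
  induction sessions generalizing o k g with
  | nil => simp [altLoop, lists_filter_types]
  | cons s rest ih =>
    simp only [altLoop, lists_filter_types, List.filter_cons]
    by_cases h1 : (ftOf s == "old" || ftOf s == "band_type" || ftOf s == "band_proband") = true
    · obtain ⟨h2a, h2b, h3⟩ := old_excl (ftOf s) h1
      simp [h1, h2a, h2b, h3, ih, lists_filter_types]
    · by_cases h2 : (ftOf s == "band_recommender" || PySem.Str.isIn "knn" (ftOf s)) = true
      · have h3 : (ftOf s == "gru") = false := by
          by_contra hc
          obtain ⟨ha, hb⟩ := gru_excl (ftOf s) (by revert hc; cases ftOf s == "gru" <;> simp)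
          simp [ha, hb, PySem.Str.isIn] at h2
        rw [Bool.or_eq_true] at h2
        rcases h2 with h2 | h2
        · simp [h1, h2, h3, ih, lists_filter_types]
        · have hk : PySem.Chars.isIn ['k', 'n', 'n'] (ftOf s).toList = true := h2
          simp [h1, hk, h3, ih, lists_filter_types]
      · simp only [Bool.not_eq_true, Bool.or_eq_false_iff, PySem.Str.isIn] at h2
        have h2b : PySem.Chars.isIn ['k', 'n', 'n'] (ftOf s).toList = false := h2.2
        by_cases h3 : (ftOf s == "gru") = true
        · simp [h1, h2.1, h2b, h3, ih, lists_filter_types]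
        · simp [h1, h2.1, h2b, h3, ih, lists_filter_types]

-- ===== VERDICT (by name: the statement is the Claim_ definition above) =====
theorem lists_filter_types_spec : Claim_equal_lists_filter_types := by
  intro sessions _ _
  show lists_filter_types sessions = lists_filter_types_alt sessions
  rw [lists_filter_types_alt, altLoop_spec]
  simp
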